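-- pv_equiv track=rewrite | github.com/ArchiMoebius/casbin | python/repl/completer.py | _extract_typed_flags
-- ===== SOURCE A (Python) =====
-- def _extract_typed_flags(words: list[str]) -> dict[str, str]:
--     """
--     Scan words for --flag value pairs already typed in the buffer.
--     Returns a dict with both the original name and its uppercase variant so
--     source_request templates like '{"env":"${ENV}"}' expand correctly when
--     the user has typed --env dev.
--
--     Example:
--       ["config.get", "--env", "dev", "--key"]
--       → {"env": "dev", "ENV": "dev"}
--     """
--     result: dict[str, str] = {}
--     i = 1  # skip command word
--     while i < len(words) - 1:
--         w = words[i]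
--         if w.startswith("--"):
--             name = w.lstrip("-")
--             value = words[i + 1]
--             if not value.startswith("-"):
--                 result[name] = value
--                 result[name.upper()] = value
--                 i += 2
--                 continue
--         i += 1
--     return result
-- ===== SOURCE B (Python) =====
-- def _extract_typed_flags(words: list[str]) -> dict[str, str]:
--     """Pair-wise scan: look at every consecutive (flag, value) pair after the
--     command word; an accepted value never starts with '-', so it can never be
--     a flag itself and no manual index skipping is needed."""
--     result: dict[str, str] = {}
--     for flag, value in zip(words[1:], words[2:]):
--         if flag.startswith("--") and not value.startswith("-"):
--             name = flag.lstrip("-")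
--             result[name] = value
--             result[name.upper()] = value
--     return result
-- ===== Notes on version B (the rewrite author's own statement) =====
-- stated objective: simpler
-- what changed: Replaced the while loop with a manually stepped index (advancing by 1 or 2) by a single fold over all consecutive (flag, value) pairs of words[1:] zipped with words[2:]; the variable-step skip is dropped because an accepted value never starts with '-' and so can never match as a flag.
import Mathlib
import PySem

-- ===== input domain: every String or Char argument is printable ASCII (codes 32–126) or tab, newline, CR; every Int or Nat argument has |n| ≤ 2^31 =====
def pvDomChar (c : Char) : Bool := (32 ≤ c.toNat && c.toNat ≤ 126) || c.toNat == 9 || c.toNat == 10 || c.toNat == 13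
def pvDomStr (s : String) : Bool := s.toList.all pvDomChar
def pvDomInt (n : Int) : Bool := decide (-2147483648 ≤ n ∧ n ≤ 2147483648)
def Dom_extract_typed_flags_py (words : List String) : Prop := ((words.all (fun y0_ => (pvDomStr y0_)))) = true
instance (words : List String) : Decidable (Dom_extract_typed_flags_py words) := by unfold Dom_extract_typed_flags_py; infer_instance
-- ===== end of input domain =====

-- B replaces A's manually stepped while loop (index advancing by 1 or 2) with one fold over
-- all consecutive (flag, value) pairs zip(words[1:], words[2:]) — simpler; return value only.

-- w.lstrip("-") ported by hand (drop leading '-' characters; exact: lstrip with an explicit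
-- char set drops exactly the leading characters from that set). Shared by both ports.
def pyLstripDash (w : String) : String := String.ofList (w.toList.dropWhile (fun c => c == '-'))

-- ===== PORT A =====
-- the while loop of A: state (result, i), i stepping by 1 or 2
def extractGoA (words : List String) (result : PySem.Dict String String) (i : Nat) :
    PySem.Dict String String :=
  if h : i < words.length - 1 then
    let w := words.getD i ""   -- in range: i < len(words) - 1
    if PySem.Str.startswith w "--" then
      let name := pyLstripDash w
      let value := words.getD (i + 1) ""
      if !(PySem.Str.startswith value "-") then
        extractGoA words ((result.insert name value).insert (PySem.Str.upper name) value) (i + 2)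
      else
        extractGoA words result (i + 1)
    else
      extractGoA words result (i + 1)
  else result
termination_by words.length - i
decreasing_by all_goals omega

def extract_typed_flags_py (words : List String) : List (String × String) :=
  (extractGoA words PySem.Dict.empty 1).items

-- ===== PORT B =====
-- the body of B's for loop over (flag, value) pairs
def extractStepB (result : PySem.Dict String String) (p : String × String) :
    PySem.Dict String String :=
  if PySem.Str.startswith p.1 "--" && !(PySem.Str.startswith p.2 "-") then
    let name := pyLstripDash p.1
    (result.insert name p.2).insert (PySem.Str.upper name) p.2
  else result

def extract_typed_flags_py_alt (words : List String) : List (String × String) :=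
  ((List.zip (PySem.List.slice words (some 1) none) (PySem.List.slice words (some 2) none)).foldl
    extractStepB PySem.Dict.empty).items

-- ===== PRECONDITION & SPEC =====
def Spec_extract_typed_flags_py (words : List String) (out : List (String × String)) : Prop := out = extract_typed_flags_py_alt words
instance (words : List String) (out : List (String × String)) : Decidable (Spec_extract_typed_flags_py words out) := by unfold Spec_extract_typed_flags_py; infer_instance

-- ===== CLAIM (what is proved, stated in full; the proofs are below) =====
def Claim_equal_extract_typed_flags_py : Prop := ∀ (words : List String), Dom_extract_typed_flags_py words → Spec_extract_typed_flags_py words (extract_typed_flags_py words)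

-- ===== LEMMAS AND PROOFS =====

-- a list of chars that does not start with '-' does not start with "--"
lemma not_startswith_dash2_chars (l : List Char)
    (h : PySem.Chars.startswith l ['-'] = false) :
    PySem.Chars.startswith l ['-', '-'] = false := by
  cases hc : PySem.Chars.startswith l ['-', '-'] with
  | false => rfl
  | true =>
    have hpre := (PySem.Chars.startswith_iff l ['-', '-']).mp hc
    have h1 : ['-'] <+: l := List.IsPrefix.trans ⟨['-'], rfl⟩ hpre
    rw [(PySem.Chars.startswith_iff l ['-']).mpr h1] at h
    simp at h

-- a string that does not start with "-" does not start with "--"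
lemma not_startswith_dash_dashdash (s : String)
    (h : PySem.Str.startswith s "-" = false) : PySem.Str.startswith s "--" = false := by
  have hc : PySem.Chars.startswith s.toList ['-'] = false := by simpa using h
  have := not_startswith_dash2_chars s.toList hc
  simpa using this

-- the skipped pair in A (whose first component is an accepted value) is inert in B's fold
lemma extractStepB_skip (d : PySem.Dict String String) (v w : String)
    (h : PySem.Str.startswith v "-" = false) : extractStepB d (v, w) = d := by
  unfold extractStepB
  rw [not_startswith_dash_dashdash v h]
  simp

-- B's fold over the pairs of (v :: xs) zipped with xs starts with an inert pair when v is an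
-- accepted value (does not start with '-')
lemma extract_foldl_skip (v : String) (xs : List String) (d : PySem.Dict String String)
    (h : PySem.Str.startswith v "-" = false) :
    ((v :: xs).zip xs).foldl extractStepB d = (xs.zip (xs.drop 1)).foldl extractStepB d := by
  cases xs with
  | nil => rfl
  | cons y ys =>
    rw [List.zip_cons_cons, List.foldl_cons, extractStepB_skip _ _ _ h]
    simp

-- main invariant: A's loop from index i equals B's fold over the remaining pairs
lemma extractGoA_eq_foldl (words : List String) (d : PySem.Dict String String) (i : Nat) :
    extractGoA words d i
      = ((words.drop i).zip (words.drop (i + 1))).foldl extractStepB d := by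
  by_cases h : i < words.length - 1
  · have hi : i < words.length := by omega
    have hi1 : i + 1 < words.length := by omega
    have hdropi : words.drop i = words[i] :: words.drop (i + 1) :=
      List.drop_eq_getElem_cons hi
    have hdropi1 : words.drop (i + 1) = words[i + 1] :: words.drop (i + 2) :=
      List.drop_eq_getElem_cons hi1
    rw [extractGoA]
    simp only [h, dite_true]
    rw [List.getD_eq_getElem words "" hi, List.getD_eq_getElem words "" hi1]
    rw [hdropi1, hdropi, List.zip_cons_cons, List.foldl_cons]
    by_cases hw : PySem.Str.startswith words[i] "--" = true
    · by_cases hv : PySem.Str.startswith words[i + 1] "-" = false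
      · rw [if_pos hw, if_pos (by rw [hv]; rfl)]
        have hstep : extractStepB d (words[i], words[i + 1])
            = (d.insert (pyLstripDash words[i]) words[i + 1]).insert
                (PySem.Str.upper (pyLstripDash words[i])) words[i + 1] := by
          unfold extractStepB
          rw [hw, hv]
          simp
        rw [hstep, extractGoA_eq_foldl words _ (i + 2), hdropi1,
          extract_foldl_skip _ _ _ hv, List.drop_drop]
      · have hv' : PySem.Str.startswith words[i + 1] "-" = true := by
          cases he : PySem.Str.startswith words[i + 1] "-" with
          | true => rfl
          | false => exact absurd he hv
        rw [if_pos hw, if_neg (by rw [hv']; decide)]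
        have hstep : extractStepB d (words[i], words[i + 1]) = d := by
          unfold extractStepB
          rw [hv']
          simp
        rw [hstep, extractGoA_eq_foldl words d (i + 1), show i + 1 + 1 = i + 2 by omega]
    · have hw' : PySem.Str.startswith words[i] "--" = false := by
        cases he : PySem.Str.startswith words[i] "--" with
        | true => exact absurd he hw
        | false => rfl
      rw [if_neg (by rw [hw']; decide)]
      have hstep : extractStepB d (words[i], words[i + 1]) = d := by
        unfold extractStepB
        rw [hw']
        simp
      rw [hstep, extractGoA_eq_foldl words d (i + 1), show i + 1 + 1 = i + 2 by omega]
  · have hnil1 : words.drop (i + 1) = [] := List.drop_eq_nil_of_le (by omega)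
    rw [extractGoA]
    simp [h, hnil1]
termination_by words.length - i
decreasing_by all_goals omega

-- ===== VERDICT (by name: the statement is the Claim_ definition above) =====
theorem extract_typed_flags_py_spec : Claim_equal_extract_typed_flags_py := by
  intro words _
  unfold Spec_extract_typed_flags_py extract_typed_flags_py extract_typed_flags_py_alt
  rw [extractGoA_eq_foldl words PySem.Dict.empty 1]
  have h1 : PySem.List.slice words (some 1) none = words.drop 1 := by
    simpa using PySem.List.slice_from_natCast words 1
  have h2 : PySem.List.slice words (some 2) none = words.drop 2 := by
    simpa using PySem.List.slice_from_natCast words 2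
  rw [h1, h2]
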